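-- pv_equiv track=rewrite | github.com/je488/Algorithm-Study | 백준/BOJ_20327.py | op7
-- ===== SOURCE A (Python) =====
-- def op7(a, l):
--     n = len(a)
--     ans = [[0] * n for _ in range(n)]
--     sub_size = (1 << l)
--     sub_count = n // sub_size
--     for i in range(sub_count):
--         for j in range(sub_count):
--             x1 = i * sub_size
--             y1 = j * sub_size
--             x2 = (sub_count-j-1) * sub_size
--             y2 = i * sub_size
--             for x in range(sub_size):
--                 for y in range(sub_size):
--                     ans[x1+x][y1+y] = a[x2+x][y2+y]
--     return ans
-- ===== SOURCE B (Python) =====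
-- def op7(a, l):
--     n = len(a)
--     ss = 1 << l
--     sc = n // ss
--     m = sc * ss
--     # grid of the sub_size x sub_size blocks of the top-left m x m region
--     grid = [[[row[q * ss:(q + 1) * ss] for row in a[p * ss:(p + 1) * ss]]
--              for q in range(sc)]
--             for p in range(sc)]
--     # rotate the grid of blocks 90 degrees clockwise (block contents unchanged)
--     rot = [[grid[sc - 1 - j][i] for j in range(sc)] for i in range(sc)]
--     # emit the rotated blocks row by row, padding with zeros outside the block region
--     out = []
--     for i in range(sc):
--         for x in range(ss):
--             out.append([v for blk in rot[i] for v in blk[x]] + [0] * (n - m))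
--     out += [[0] * n for _ in range(n - m)]
--     return out
-- ===== Notes on version B (the rewrite author's own statement) =====
-- stated objective: alternative
-- what changed: B recognizes the operation as a 90-degree clockwise rotation of the grid of blocks: it slices the matrix into a sub_count x sub_count grid of blocks, rotates that grid (rot[i][j] = grid[sc-1-j][i]) and emits the output row by row by concatenating block slices, instead of A's four nested loops writing single cells into a preallocated zero matrix.
import Mathlib
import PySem

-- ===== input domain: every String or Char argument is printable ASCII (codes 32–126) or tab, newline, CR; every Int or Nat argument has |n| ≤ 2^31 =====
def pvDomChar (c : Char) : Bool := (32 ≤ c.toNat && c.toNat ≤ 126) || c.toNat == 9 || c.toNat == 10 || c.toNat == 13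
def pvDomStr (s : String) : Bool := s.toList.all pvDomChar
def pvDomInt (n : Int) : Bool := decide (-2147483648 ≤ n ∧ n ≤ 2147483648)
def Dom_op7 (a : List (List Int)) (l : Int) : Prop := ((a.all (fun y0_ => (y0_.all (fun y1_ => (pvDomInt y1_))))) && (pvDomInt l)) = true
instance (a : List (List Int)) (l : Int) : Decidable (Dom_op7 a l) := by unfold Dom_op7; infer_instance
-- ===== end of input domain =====

-- B rebuilds the output as a clockwise rotation of the grid of blocks, emitting whole rows
-- by concatenating block slices (objective: alternative decomposition, no per-cell writes).

-- ===== PORT A =====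
-- ans[x1+x][y1+y] = a[x2+x][y2+y] : one in-place cell write
def pvSetCell (m : List (List Int)) (r c : Nat) (v : Int) : List (List Int) :=
  m.set r ((m.getD r []).set c v)

def op7 (a : List (List Int)) (l : Int) : List (List Int) :=
  let n := a.length
  let sub_size := 1 <<< l.toNat           -- 1 << l  (Pre_ requires 0 ≤ l; Python raises otherwise)
  let sub_count := n / sub_size
  let ans0 := List.replicate n (List.replicate n (0 : Int))
  (List.range sub_count).foldl (fun ans i =>
    (List.range sub_count).foldl (fun ans j =>
      (List.range sub_size).foldl (fun ans x =>
        (List.range sub_size).foldl (fun ans y =>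
          pvSetCell ans (i * sub_size + x) (j * sub_size + y)
            ((a.getD ((sub_count - 1 - j) * sub_size + x) []).getD (i * sub_size + y) 0))
        ans) ans) ans) ans0

-- ===== PORT B =====
def op7_alt (a : List (List Int)) (l : Int) : List (List Int) :=
  let n := a.length
  let ss := 1 <<< l.toNat
  let sc := n / ss
  let m := sc * ss
  -- grid of the ss×ss blocks of the top-left m×m region
  let grid := (List.range sc).map (fun p => (List.range sc).map (fun q =>
      ((a.drop (p * ss)).take ss).map (fun row => (row.drop (q * ss)).take ss)))
  -- rotate the grid of blocks 90° clockwise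
  let rot := (List.range sc).map (fun i => (List.range sc).map (fun j =>
      (grid.getD (sc - 1 - j) []).getD i []))
  -- emit the rotated blocks row by row, padding with zeros outside the block region
  ((List.range sc).flatMap (fun i => (List.range ss).map (fun x =>
      ((rot.getD i []).flatMap (fun blk => blk.getD x [])) ++ List.replicate (n - m) 0)))
    ++ List.replicate (n - m) (List.replicate n (0 : Int))

-- ===== PRECONDITION & SPEC =====
-- Pre_ excludes exactly the inputs where A raises: l < 0 (ValueError on 1 << l) and inputs
-- where some row inside the rearranged sub_count*sub_size region is shorter than that region
-- (IndexError on a[x2+x][y2+y]).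
def Pre_op7 (a : List (List Int)) (l : Int) : Prop :=
  0 ≤ l ∧
    ∀ row ∈ a.take (a.length / (1 <<< l.toNat) * (1 <<< l.toNat)),
      a.length / (1 <<< l.toNat) * (1 <<< l.toNat) ≤ row.length
instance (a : List (List Int)) (l : Int) : Decidable (Pre_op7 a l) := by
  unfold Pre_op7; infer_instance

def pvWitness_op7 : List (List Int) × Int := ([[1, 2], [3, 4]], 0)

def Spec_op7 (a : List (List Int)) (l : Int) (out : List (List Int)) : Prop := out = op7_alt a l
instance (a : List (List Int)) (l : Int) (out : List (List Int)) : Decidable (Spec_op7 a l out) := by unfold Spec_op7; infer_instance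

-- ===== CLAIM (what is proved, stated in full; the proofs are below) =====
def Claim_equal_op7 : Prop := ∀ (a : List (List Int)) (l : Int), Dom_op7 a l → Pre_op7 a l → Spec_op7 a l (op7 a l)
-- ===== LEMMAS AND PROOFS =====

-- matrix entry (total, default 0)
def pvEntry (m : List (List Int)) (r c : Nat) : Int := (m.getD r []).getD c 0

-- the common normal form both ports are proved equal to
def pvSrc (a : List (List Int)) (sc ss r c : Nat) : Int :=
  (a.getD ((sc - 1 - c / ss) * ss + r % ss) []).getD ((r / ss) * ss + c % ss) 0

def pvTarget (a : List (List Int)) (sc ss : Nat) : List (List Int) :=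
  (List.range a.length).map (fun r => (List.range a.length).map (fun c =>
    if r < sc * ss ∧ c < sc * ss then pvSrc a sc ss r c else 0))

-- "s is an n×n matrix"
def pvGood (s : List (List Int)) (n : Nat) : Prop :=
  s.length = n ∧ ∀ k < n, (s.getD k []).length = n

theorem pvGetD_map_range {α : Type} (f : Nat → α) (d : α) (k i : Nat) (h : i < k) :
    ((List.range k).map f).getD i d = f i := by
  rw [List.getD_eq_getElem?_getD, List.getElem?_map]
  simp [h]

theorem pvRange_mul (k s : Nat) :
    List.range (k * s) = (List.range k).flatMap (fun i => (List.range s).map (fun x => i * s + x)) := by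
  induction k with
  | zero => simp
  | succ k ih =>
    rw [Nat.succ_mul, List.range_add, ih, List.range_succ, List.flatMap_append]
    simp

theorem pvGetD_set {alpha : Type} (l : List alpha) (i j : Nat) (w d : alpha) :
    (l.set i w).getD j d = if i = j ∧ i < l.length then w else l.getD j d := by
  by_cases h1 : i = j
  · subst h1
    by_cases h2 : i < l.length
    · rw [List.getD_eq_getElem?_getD, List.getElem?_set_self h2, if_pos ⟨rfl, h2⟩]
      rfl
    · rw [List.set_eq_of_length_le (by omega), if_neg (fun h => h2 h.2)]
  · rw [List.getD_eq_getElem?_getD, List.getElem?_set_ne h1, ← List.getD_eq_getElem?_getD,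
      if_neg (fun h => h1 h.1)]

theorem pvGood_setCell (m : List (List Int)) (n r c : Nat) (v : Int) (h : pvGood m n) :
    pvGood (pvSetCell m r c v) n := by
  obtain ⟨h1, h2⟩ := h
  refine ⟨by simp [pvSetCell, h1], ?_⟩
  intro k hk
  unfold pvSetCell
  rw [pvGetD_set]
  split_ifs with h3
  · obtain ⟨h3, -⟩ := h3
    subst h3
    rw [List.length_set]
    exact h2 r hk
  · exact h2 k hk

theorem pvEntry_setCell (m : List (List Int)) (n r c : Nat) (v : Int) (h : pvGood m n)
    (r' c' : Nat) :
    pvEntry (pvSetCell m r c v) r' c' =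
      if r' = r ∧ c' = c ∧ r < n ∧ c < n then v else pvEntry m r' c' := by
  obtain ⟨h1, h2⟩ := h
  unfold pvEntry pvSetCell
  rw [pvGetD_set]
  by_cases h3 : r = r' ∧ r < m.length
  · obtain ⟨h3, hrl⟩ := h3
    subst h3
    have hrn : r < n := by omega
    rw [if_pos ⟨rfl, hrl⟩, pvGetD_set]
    by_cases h4 : c = c' ∧ c < (m.getD r []).length
    · obtain ⟨h4, hcl⟩ := h4
      subst h4
      have hcn : c < n := by rw [h2 r hrn] at hcl; exact hcl
      rw [if_pos ⟨rfl, hcl⟩, if_pos ⟨rfl, rfl, hrn, hcn⟩]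
    · rw [if_neg h4, if_neg]
      rintro ⟨-, hc, -, hcn⟩
      exact h4 ⟨hc.symm, by rw [h2 r hrn]; omega⟩
  · rw [if_neg h3, if_neg]
    rintro ⟨hr, -, hrn, -⟩
    exact h3 ⟨hr.symm, by omega⟩

theorem pvFoldWrites (f : Nat → Nat → Int) (n : Nat) (P : List (Nat × Nat))
    (s : List (List Int)) (h : pvGood s n) :
    pvGood (P.foldl (fun t p => pvSetCell t p.1 p.2 (f p.1 p.2)) s) n ∧
    ∀ r c, pvEntry (P.foldl (fun t p => pvSetCell t p.1 p.2 (f p.1 p.2)) s) r c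
      = if (r, c) ∈ P ∧ r < n ∧ c < n then f r c else pvEntry s r c := by
  induction P generalizing s with
  | nil => exact ⟨h, by simp⟩
  | cons p P ih =>
    obtain ⟨ih1, ih2⟩ := ih (pvSetCell s p.1 p.2 (f p.1 p.2)) (pvGood_setCell _ _ _ _ _ h)
    refine ⟨by simpa using ih1, ?_⟩
    intro r c
    rw [List.foldl_cons, ih2 r c, pvEntry_setCell s n p.1 p.2 _ h r c]
    by_cases hp1 : r = p.1
    · by_cases hp2 : c = p.2
      · subst hp1
        subst hp2
        by_cases hP : (p.1, p.2) ∈ P <;> by_cases hb : p.1 < n ∧ p.2 < n <;>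
          simp_all
      · have hne : ¬((r, c) = p) := fun he => hp2 (congrArg Prod.snd he)
        have h4 : ¬(r = p.1 ∧ c = p.2 ∧ p.1 < n ∧ p.2 < n) := by tauto
        simp only [List.mem_cons, hne, false_or, if_neg h4]
    · have hne : ¬((r, c) = p) := fun he => hp1 (congrArg Prod.fst he)
      have h4 : ¬(r = p.1 ∧ c = p.2 ∧ p.1 < n ∧ p.2 < n) := by tauto
      simp only [List.mem_cons, hne, false_or, if_neg h4]

theorem pvDivMod (ss i x : Nat) (hx : x < ss) :
    (i * ss + x) / ss = i ∧ (i * ss + x) % ss = x := by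
  have hss : 0 < ss := by omega
  constructor
  · rw [Nat.mul_comm i ss, Nat.mul_add_div hss, Nat.div_eq_of_lt hx, Nat.add_zero]
  · rw [Nat.mul_comm i ss, Nat.mul_add_mod, Nat.mod_eq_of_lt hx]

theorem pvMemP (sc ss r c : Nat) (hss : 0 < ss) :
    ((r, c) ∈ (List.range sc).flatMap (fun i => (List.range sc).flatMap (fun j =>
      (List.range ss).flatMap (fun x => (List.range ss).map (fun y =>
        (i * ss + x, j * ss + y)))))) ↔ (r < sc * ss ∧ c < sc * ss) := by
  simp only [List.mem_flatMap, List.mem_map, List.mem_range]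
  constructor
  · rintro ⟨i, hi, j, hj, x, hx, y, hy, he⟩
    have h1 : i * ss + x = r := congrArg Prod.fst he
    have h2 : j * ss + y = c := congrArg Prod.snd he
    have h3 : (i + 1) * ss ≤ sc * ss := Nat.mul_le_mul_right ss hi
    have h4 : (j + 1) * ss ≤ sc * ss := Nat.mul_le_mul_right ss hj
    have h5 : (i + 1) * ss = i * ss + ss := by ring
    have h6 : (j + 1) * ss = j * ss + ss := by ring
    omega
  · rintro ⟨hr, hc⟩
    refine ⟨r / ss, (Nat.div_lt_iff_lt_mul hss).mpr hr, c / ss,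
      (Nat.div_lt_iff_lt_mul hss).mpr hc, r % ss, Nat.mod_lt _ hss, c % ss, Nat.mod_lt _ hss, ?_⟩
    have h1 := Nat.div_add_mod r ss
    have h2 := Nat.div_add_mod c ss
    have h3 : r / ss * ss = ss * (r / ss) := Nat.mul_comm _ _
    have h4 : c / ss * ss = ss * (c / ss) := Nat.mul_comm _ _
    exact Prod.ext (by dsimp; omega) (by dsimp; omega)

theorem pvFoldl_congr_mem {alpha beta : Type} (l : List alpha) (f g : beta → alpha → beta) (b : beta)
    (h : ∀ b a, a ∈ l → f b a = g b a) : l.foldl f b = l.foldl g b := by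
  induction l generalizing b with
  | nil => rfl
  | cons x xs ih =>
    rw [List.foldl_cons, List.foldl_cons, h b x List.mem_cons_self]
    exact ih _ fun b a ha => h b a (List.mem_cons_of_mem _ ha)

theorem pvGood_replicate (n : Nat) :
    pvGood (List.replicate n (List.replicate n (0 : Int))) n := by
  refine ⟨List.length_replicate, fun k hk => ?_⟩
  rw [List.getD_replicate _ hk, List.length_replicate]

theorem pvEntry_replicate (n r c : Nat) :
    pvEntry (List.replicate n (List.replicate n (0 : Int))) r c = 0 := by
  unfold pvEntry
  by_cases h1 : r < n
  · rw [List.getD_replicate _ h1, List.getD_eq_getElem?_getD, List.getElem?_replicate]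
    split_ifs <;> rfl
  · rw [List.getD_eq_getElem?_getD (l := List.replicate n (List.replicate n (0 : Int))),
      List.getElem?_replicate, if_neg h1]
    rfl

theorem pvGood_target (a : List (List Int)) (sc ss : Nat) : pvGood (pvTarget a sc ss) a.length := by
  refine ⟨by simp [pvTarget], fun k hk => ?_⟩
  unfold pvTarget
  rw [pvGetD_map_range _ _ _ _ hk]
  simp

theorem pvEntry_target (a : List (List Int)) (sc ss r c : Nat) (hr : r < a.length)
    (hc : c < a.length) :
    pvEntry (pvTarget a sc ss) r c =
      if r < sc * ss ∧ c < sc * ss then pvSrc a sc ss r c else 0 := by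
  unfold pvEntry pvTarget
  rw [pvGetD_map_range _ _ _ _ hr, pvGetD_map_range _ _ _ _ hc]

theorem pvMat_eq (s t : List (List Int)) (n : Nat) (hs : pvGood s n) (ht : pvGood t n)
    (h : ∀ r < n, ∀ c < n, pvEntry s r c = pvEntry t r c) : s = t := by
  obtain ⟨hs1, hs2⟩ := hs
  obtain ⟨ht1, ht2⟩ := ht
  apply List.ext_getElem (by omega)
  intro r h1 h2
  have hrn : r < n := by omega
  have hsr : s.getD r [] = s[r] := List.getD_eq_getElem s [] h1
  have htr : t.getD r [] = t[r] := List.getD_eq_getElem t [] h2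
  have hls : s[r].length = n := by rw [← hsr]; exact hs2 r hrn
  have hlt : t[r].length = n := by rw [← htr]; exact ht2 r hrn
  apply List.ext_getElem (by omega)
  intro c h3 h4
  have hcn : c < n := by omega
  have e1 := h r hrn c hcn
  unfold pvEntry at e1
  rw [hsr, htr, List.getD_eq_getElem _ _ (by omega), List.getD_eq_getElem _ _ (by omega)] at e1
  exact e1

-- A-side characterization: the quadruple write-loop computes pvTarget
theorem pvA_eq_target (a : List (List Int)) (l : Int) :
    op7 a l = pvTarget a (a.length / (1 <<< l.toNat)) (1 <<< l.toNat) := by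
  have hss : 0 < (1 <<< l.toNat) := by rw [Nat.one_shiftLeft]; positivity
  have e0 : op7 a l =
      (List.range (a.length / (1 <<< l.toNat))).foldl (fun ans i =>
        (List.range (a.length / (1 <<< l.toNat))).foldl (fun ans j =>
          (List.range (1 <<< l.toNat)).foldl (fun ans x =>
            (List.range (1 <<< l.toNat)).foldl (fun ans y =>
              pvSetCell ans (i * (1 <<< l.toNat) + x) (j * (1 <<< l.toNat) + y)
                ((a.getD (((a.length / (1 <<< l.toNat)) - 1 - j) * (1 <<< l.toNat) + x) []).getD (i * (1 <<< l.toNat) + y) 0))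
            ans) ans) ans) (List.replicate a.length (List.replicate a.length (0 : Int))) := rfl
  have e1 : (((List.range (a.length / (1 <<< l.toNat))).flatMap (fun i => (List.range (a.length / (1 <<< l.toNat))).flatMap (fun j =>
        (List.range (1 <<< l.toNat)).flatMap (fun x => (List.range (1 <<< l.toNat)).map (fun y =>
          (i * (1 <<< l.toNat) + x, j * (1 <<< l.toNat) + y)))))).foldl
        (fun t p => pvSetCell t p.1 p.2 (pvSrc a (a.length / (1 <<< l.toNat)) (1 <<< l.toNat) p.1 p.2)) (List.replicate a.length (List.replicate a.length (0 : Int)))) =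
      (List.range (a.length / (1 <<< l.toNat))).foldl (fun ans i =>
        (List.range (a.length / (1 <<< l.toNat))).foldl (fun ans j =>
          (List.range (1 <<< l.toNat)).foldl (fun ans x =>
            (List.range (1 <<< l.toNat)).foldl (fun ans y =>
              pvSetCell ans (i * (1 <<< l.toNat) + x) (j * (1 <<< l.toNat) + y)
                (pvSrc a (a.length / (1 <<< l.toNat)) (1 <<< l.toNat) (i * (1 <<< l.toNat) + x) (j * (1 <<< l.toNat) + y)))
            ans) ans) ans) (List.replicate a.length (List.replicate a.length (0 : Int))) := by
    simp only [List.foldl_flatMap, List.foldl_map]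
  have e2 : (List.range (a.length / (1 <<< l.toNat))).foldl (fun ans i =>
        (List.range (a.length / (1 <<< l.toNat))).foldl (fun ans j =>
          (List.range (1 <<< l.toNat)).foldl (fun ans x =>
            (List.range (1 <<< l.toNat)).foldl (fun ans y =>
              pvSetCell ans (i * (1 <<< l.toNat) + x) (j * (1 <<< l.toNat) + y)
                (pvSrc a (a.length / (1 <<< l.toNat)) (1 <<< l.toNat) (i * (1 <<< l.toNat) + x) (j * (1 <<< l.toNat) + y)))
            ans) ans) ans) (List.replicate a.length (List.replicate a.length (0 : Int))) =
      (List.range (a.length / (1 <<< l.toNat))).foldl (fun ans i =>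
        (List.range (a.length / (1 <<< l.toNat))).foldl (fun ans j =>
          (List.range (1 <<< l.toNat)).foldl (fun ans x =>
            (List.range (1 <<< l.toNat)).foldl (fun ans y =>
              pvSetCell ans (i * (1 <<< l.toNat) + x) (j * (1 <<< l.toNat) + y)
                ((a.getD (((a.length / (1 <<< l.toNat)) - 1 - j) * (1 <<< l.toNat) + x) []).getD (i * (1 <<< l.toNat) + y) 0))
            ans) ans) ans) (List.replicate a.length (List.replicate a.length (0 : Int))) := by
    apply pvFoldl_congr_mem
    intro b i _
    apply pvFoldl_congr_mem
    intro b j _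
    apply pvFoldl_congr_mem
    intro b x hx
    apply pvFoldl_congr_mem
    intro b y hy
    rw [List.mem_range] at hx hy
    unfold pvSrc
    rw [(pvDivMod _ i x hx).1, (pvDivMod _ i x hx).2,
      (pvDivMod _ j y hy).1, (pvDivMod _ j y hy).2]
  rw [e0, ← e2, ← e1]
  obtain ⟨hgood, hentry⟩ := pvFoldWrites (pvSrc a (a.length / (1 <<< l.toNat)) (1 <<< l.toNat)) a.length
    ((List.range (a.length / (1 <<< l.toNat))).flatMap (fun i => (List.range (a.length / (1 <<< l.toNat))).flatMap (fun j =>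
        (List.range (1 <<< l.toNat)).flatMap (fun x => (List.range (1 <<< l.toNat)).map (fun y =>
          (i * (1 <<< l.toNat) + x, j * (1 <<< l.toNat) + y)))))) (List.replicate a.length (List.replicate a.length (0 : Int))) (pvGood_replicate a.length)
  apply pvMat_eq _ _ a.length hgood (pvGood_target a (a.length / (1 <<< l.toNat)) (1 <<< l.toNat))
  intro r hr c hc
  rw [hentry r c, pvEntry_target a (a.length / (1 <<< l.toNat)) (1 <<< l.toNat) r c hr hc, pvEntry_replicate]
  by_cases hm : r < (a.length / (1 <<< l.toNat)) * (1 <<< l.toNat) ∧ c < (a.length / (1 <<< l.toNat)) * (1 <<< l.toNat)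
  · rw [if_pos ⟨(pvMemP (a.length / (1 <<< l.toNat)) (1 <<< l.toNat) r c hss).mpr hm, hr, hc⟩, if_pos hm]
  · rw [if_neg fun h => hm ((pvMemP (a.length / (1 <<< l.toNat)) (1 <<< l.toNat) r c hss).mp h.1), if_neg hm]

-- B-side helper lemmas
theorem pvFlatMap_congr {alpha beta : Type} (l : List alpha) (f g : alpha → List beta)
    (h : ∀ a ∈ l, f a = g a) : l.flatMap f = l.flatMap g := by
  induction l with
  | nil => rfl
  | cons v t ih =>
    rw [List.flatMap_cons, List.flatMap_cons, h v List.mem_cons_self,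
      ih fun a ha => h a (List.mem_cons_of_mem _ ha)]

theorem pvSlice_map (row : List Int) (u s : Nat) (h : u + s ≤ row.length) :
    (row.drop u).take s = (List.range s).map (fun y => row.getD (u + y) 0) := by
  apply List.ext_getElem
  · simp only [List.length_take, List.length_drop, List.length_map, List.length_range]
    omega
  · intro k h1 h2
    rw [List.getElem_take, List.getElem_drop, List.getElem_map, List.getElem_range,
      List.getD_eq_getElem row 0 (by simp only [List.length_take, List.length_drop] at h1; omega)]

-- one emitted row of the rotated block grid is the corresponding stretch of pvSrc values
theorem pvB_row (a : List (List Int)) (l : Int) (h : Pre_op7 a l) (i x : Nat)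
    (hi : i < (a.length / (1 <<< l.toNat))) (hx : x < (1 <<< l.toNat)) :
    (((List.range (a.length / (1 <<< l.toNat))).map (fun i2 => (List.range (a.length / (1 <<< l.toNat))).map (fun j => (((List.range (a.length / (1 <<< l.toNat))).map (fun p => (List.range (a.length / (1 <<< l.toNat))).map (fun q => ((a.drop (p * (1 <<< l.toNat))).take (1 <<< l.toNat)).map (fun row => (row.drop (q * (1 <<< l.toNat))).take (1 <<< l.toNat))))).getD ((a.length / (1 <<< l.toNat)) - 1 - j) []).getD i2 []))).getD i []).flatMap (fun blk => blk.getD x []) =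
      (List.range ((a.length / (1 <<< l.toNat)) * (1 <<< l.toNat))).map (fun c => pvSrc a (a.length / (1 <<< l.toNat)) (1 <<< l.toNat) (i * (1 <<< l.toNat) + x) c) := by
  have hss : 0 < (1 <<< l.toNat) := by rw [Nat.one_shiftLeft]; positivity
  have hmn : ((a.length / (1 <<< l.toNat)) * (1 <<< l.toNat)) ≤ a.length := Nat.div_mul_le_self _ _
  rw [pvGetD_map_range _ _ _ _ hi, List.flatMap_map, pvRange_mul (a.length / (1 <<< l.toNat)) (1 <<< l.toNat), List.map_flatMap]
  apply pvFlatMap_congr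
  intro j hj
  rw [List.mem_range] at hj
  rw [List.map_map]
  have hp : (a.length / (1 <<< l.toNat)) - 1 - j < (a.length / (1 <<< l.toNat)) := by omega
  rw [pvGetD_map_range _ _ _ _ hp, pvGetD_map_range _ _ _ _ hi]
  have hpb : ((a.length / (1 <<< l.toNat)) - 1 - j) * (1 <<< l.toNat) + (1 <<< l.toNat) ≤ ((a.length / (1 <<< l.toNat)) * (1 <<< l.toNat)) := by
    have h1 : ((a.length / (1 <<< l.toNat)) - 1 - j + 1) * (1 <<< l.toNat) ≤ (a.length / (1 <<< l.toNat)) * (1 <<< l.toNat) := Nat.mul_le_mul_right _ (by omega)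
    have h2 : ((a.length / (1 <<< l.toNat)) - 1 - j + 1) * (1 <<< l.toNat) = ((a.length / (1 <<< l.toNat)) - 1 - j) * (1 <<< l.toNat) + (1 <<< l.toNat) := by ring
    omega
  have hib : (i + 1) * (1 <<< l.toNat) ≤ ((a.length / (1 <<< l.toNat)) * (1 <<< l.toNat)) := Nat.mul_le_mul_right _ (by omega)
  have hib' : (i + 1) * (1 <<< l.toNat) = i * (1 <<< l.toNat) + (1 <<< l.toNat) := by ring
  have hidx : ((a.length / (1 <<< l.toNat)) - 1 - j) * (1 <<< l.toNat) + x < a.length := by omega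
  have hxe : (((a.drop (((a.length / (1 <<< l.toNat)) - 1 - j) * (1 <<< l.toNat))).take (1 <<< l.toNat)).map
        (fun row => (row.drop (i * (1 <<< l.toNat))).take (1 <<< l.toNat))).getD x [] =
      ((a[((a.length / (1 <<< l.toNat)) - 1 - j) * (1 <<< l.toNat) + x]'hidx).drop (i * (1 <<< l.toNat))).take (1 <<< l.toNat) := by
    rw [List.getD_eq_getElem?_getD, List.getElem?_map]
    have he : ((a.drop (((a.length / (1 <<< l.toNat)) - 1 - j) * (1 <<< l.toNat))).take (1 <<< l.toNat))[x]? =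
        some (a[((a.length / (1 <<< l.toNat)) - 1 - j) * (1 <<< l.toNat) + x]'hidx) := by
      rw [List.getElem?_take, if_pos hx, List.getElem?_drop, List.getElem?_eq_getElem hidx]
    rw [he]
    rfl
  rw [hxe]
  obtain ⟨-, hpre⟩ := h
  have hrowlen : ((a.length / (1 <<< l.toNat)) * (1 <<< l.toNat)) ≤ (a[((a.length / (1 <<< l.toNat)) - 1 - j) * (1 <<< l.toNat) + x]'hidx).length :=
    hpre _ (List.mem_take_iff_getElem.mpr ⟨((a.length / (1 <<< l.toNat)) - 1 - j) * (1 <<< l.toNat) + x, by omega, rfl⟩)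
  rw [pvSlice_map _ _ _ (by omega)]
  apply List.map_congr_left
  intro y hy
  rw [List.mem_range] at hy
  simp only [Function.comp_apply]
  unfold pvSrc
  rw [(pvDivMod _ i x hx).1, (pvDivMod _ i x hx).2,
    (pvDivMod _ j y hy).1, (pvDivMod _ j y hy).2,
    List.getD_eq_getElem a [] hidx]

-- B-side: the rotated block grid also assembles into pvTarget (uses Pre_)
theorem pvB_eq_target (a : List (List Int)) (l : Int) (h : Pre_op7 a l) :
    op7_alt a l = pvTarget a (a.length / (1 <<< l.toNat)) (1 <<< l.toNat) := by
  have hss : 0 < (1 <<< l.toNat) := by rw [Nat.one_shiftLeft]; positivity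
  have hmn : ((a.length / (1 <<< l.toNat)) * (1 <<< l.toNat)) ≤ a.length := Nat.div_mul_le_self _ _
  have e0 : op7_alt a l =
      ((List.range (a.length / (1 <<< l.toNat))).flatMap (fun i => (List.range (1 <<< l.toNat)).map (fun x =>
        (((List.range (a.length / (1 <<< l.toNat))).map (fun i2 => (List.range (a.length / (1 <<< l.toNat))).map (fun j => (((List.range (a.length / (1 <<< l.toNat))).map (fun p => (List.range (a.length / (1 <<< l.toNat))).map (fun q => ((a.drop (p * (1 <<< l.toNat))).take (1 <<< l.toNat)).map (fun row => (row.drop (q * (1 <<< l.toNat))).take (1 <<< l.toNat))))).getD ((a.length / (1 <<< l.toNat)) - 1 - j) []).getD i2 []))).getD i []).flatMap (fun blk => blk.getD x [])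
          ++ List.replicate (a.length - ((a.length / (1 <<< l.toNat)) * (1 <<< l.toNat))) 0)))
        ++ List.replicate (a.length - ((a.length / (1 <<< l.toNat)) * (1 <<< l.toNat))) (List.replicate a.length (0 : Int)) := rfl
  have hrsplit : List.range a.length = List.range ((a.length / (1 <<< l.toNat)) * (1 <<< l.toNat)) ++ ((List.range (a.length - ((a.length / (1 <<< l.toNat)) * (1 <<< l.toNat)))).map (fun t => ((a.length / (1 <<< l.toNat)) * (1 <<< l.toNat)) + t)) := by
    have h1 := List.range_add (n := ((a.length / (1 <<< l.toNat)) * (1 <<< l.toNat))) (m := a.length - ((a.length / (1 <<< l.toNat)) * (1 <<< l.toNat)))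
    rw [show ((a.length / (1 <<< l.toNat)) * (1 <<< l.toNat)) + (a.length - ((a.length / (1 <<< l.toNat)) * (1 <<< l.toNat))) = a.length from by omega] at h1
    exact h1
  have h1 : pvTarget a (a.length / (1 <<< l.toNat)) (1 <<< l.toNat) =
      (List.range ((a.length / (1 <<< l.toNat)) * (1 <<< l.toNat))).map (fun r => (List.range a.length).map (fun c => if r < ((a.length / (1 <<< l.toNat)) * (1 <<< l.toNat)) ∧ c < ((a.length / (1 <<< l.toNat)) * (1 <<< l.toNat)) then pvSrc a (a.length / (1 <<< l.toNat)) (1 <<< l.toNat) r c else 0)) ++ ((List.range (a.length - ((a.length / (1 <<< l.toNat)) * (1 <<< l.toNat)))).map (fun t => ((a.length / (1 <<< l.toNat)) * (1 <<< l.toNat)) + t)).map (fun r => (List.range a.length).map (fun c => if r < ((a.length / (1 <<< l.toNat)) * (1 <<< l.toNat)) ∧ c < ((a.length / (1 <<< l.toNat)) * (1 <<< l.toNat)) then pvSrc a (a.length / (1 <<< l.toNat)) (1 <<< l.toNat) r c else 0)) := by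
    unfold pvTarget
    rw [← List.map_append]
    exact congrArg (List.map _) hrsplit
  rw [e0, h1]
  refine congrArg₂ (· ++ ·) ?_ ?_
  · have h2 : (List.range ((a.length / (1 <<< l.toNat)) * (1 <<< l.toNat))).map (fun r => (List.range a.length).map (fun c => if r < ((a.length / (1 <<< l.toNat)) * (1 <<< l.toNat)) ∧ c < ((a.length / (1 <<< l.toNat)) * (1 <<< l.toNat)) then pvSrc a (a.length / (1 <<< l.toNat)) (1 <<< l.toNat) r c else 0)) =
        ((List.range (a.length / (1 <<< l.toNat))).flatMap (fun i => (List.range (1 <<< l.toNat)).map (fun x => i * (1 <<< l.toNat) + x))).map (fun r => (List.range a.length).map (fun c => if r < ((a.length / (1 <<< l.toNat)) * (1 <<< l.toNat)) ∧ c < ((a.length / (1 <<< l.toNat)) * (1 <<< l.toNat)) then pvSrc a (a.length / (1 <<< l.toNat)) (1 <<< l.toNat) r c else 0)) :=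
      congrArg (List.map _) (pvRange_mul (a.length / (1 <<< l.toNat)) (1 <<< l.toNat))
    rw [h2, List.map_flatMap]
    apply pvFlatMap_congr
    intro i hi
    rw [List.mem_range] at hi
    rw [List.map_map]
    apply List.map_congr_left
    intro x hx
    rw [List.mem_range] at hx
    simp only [Function.comp_apply]
    have hib : (i + 1) * (1 <<< l.toNat) ≤ ((a.length / (1 <<< l.toNat)) * (1 <<< l.toNat)) := Nat.mul_le_mul_right _ (by omega)
    have hib' : (i + 1) * (1 <<< l.toNat) = i * (1 <<< l.toNat) + (1 <<< l.toNat) := by ring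
    have hrm : (i * (1 <<< l.toNat) + x) < ((a.length / (1 <<< l.toNat)) * (1 <<< l.toNat)) := by omega
    have h3 : (List.range a.length).map (fun c => if (i * (1 <<< l.toNat) + x) < ((a.length / (1 <<< l.toNat)) * (1 <<< l.toNat)) ∧ c < ((a.length / (1 <<< l.toNat)) * (1 <<< l.toNat)) then pvSrc a (a.length / (1 <<< l.toNat)) (1 <<< l.toNat) (i * (1 <<< l.toNat) + x) c else 0) =
        (List.range ((a.length / (1 <<< l.toNat)) * (1 <<< l.toNat))).map (fun c => pvSrc a (a.length / (1 <<< l.toNat)) (1 <<< l.toNat) (i * (1 <<< l.toNat) + x) c)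
          ++ List.replicate (a.length - ((a.length / (1 <<< l.toNat)) * (1 <<< l.toNat))) (0 : Int) := by
      have h4 : (List.range a.length).map (fun c => if (i * (1 <<< l.toNat) + x) < ((a.length / (1 <<< l.toNat)) * (1 <<< l.toNat)) ∧ c < ((a.length / (1 <<< l.toNat)) * (1 <<< l.toNat)) then pvSrc a (a.length / (1 <<< l.toNat)) (1 <<< l.toNat) (i * (1 <<< l.toNat) + x) c else 0) =
          (List.range ((a.length / (1 <<< l.toNat)) * (1 <<< l.toNat))).map (fun c => if (i * (1 <<< l.toNat) + x) < ((a.length / (1 <<< l.toNat)) * (1 <<< l.toNat)) ∧ c < ((a.length / (1 <<< l.toNat)) * (1 <<< l.toNat)) then pvSrc a (a.length / (1 <<< l.toNat)) (1 <<< l.toNat) (i * (1 <<< l.toNat) + x) c else 0) ++ ((List.range (a.length - ((a.length / (1 <<< l.toNat)) * (1 <<< l.toNat)))).map (fun t => ((a.length / (1 <<< l.toNat)) * (1 <<< l.toNat)) + t)).map (fun c => if (i * (1 <<< l.toNat) + x) < ((a.length / (1 <<< l.toNat)) * (1 <<< l.toNat)) ∧ c < ((a.length / (1 <<< l.toNat))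 * (1 <<< l.toNat)) then pvSrc a (a.length / (1 <<< l.toNat)) (1 <<< l.toNat) (i * (1 <<< l.toNat) + x) c else 0) := by
        rw [← List.map_append]
        exact congrArg (List.map _) hrsplit
      rw [h4]
      refine congrArg₂ (· ++ ·) ?_ ?_
      · apply List.map_congr_left
        intro c hc
        rw [List.mem_range] at hc
        rw [if_pos ⟨hrm, hc⟩]
      · rw [List.map_map]
        rw [List.map_congr_left (g := fun _ => (0 : Int)) (fun t ht => by
          simp only [Function.comp_apply]
          rw [if_neg]
          rintro ⟨-, hcm⟩
          omega)]
        rw [List.map_const', List.length_range]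
    rw [h3, pvB_row a l h i x hi hx]
  · rw [List.map_map]
    rw [List.map_congr_left (g := fun _ => List.replicate a.length (0 : Int)) (fun t ht => by
      simp only [Function.comp_apply]
      show (List.range a.length).map _ = _
      rw [List.map_congr_left (g := fun _ => (0 : Int)) (fun c hc => by
        rw [if_neg]
        rintro ⟨hrm, -⟩
        omega)]
      rw [List.map_const', List.length_range])]
    rw [List.map_const', List.length_range]

theorem op7_spec : Claim_equal_op7 := by
  intro a l _ hpre
  unfold Spec_op7
  rw [pvA_eq_target, pvB_eq_target a l hpre]
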